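-- pv_equiv track=rewrite | github.com/VoropaevIvan/EGE | Шаблоны/№ 19-21/№ 19-21 easy 2 кучи.py | f
-- ===== SOURCE A (Python) =====
-- def f(x1, x2, c, pob):
--     if x1 + x2 >= 77:
--         return c in pob
--     if c >= max(pob):
--         return 0
--     moves = [f(x1 + 1, x2, c + 1, pob), f(x1, x2 + 1, c + 1, pob), f(x1 * 2, x2, c + 1, pob), f(x1, x2 * 2, c + 1, pob)]
--     if c % 2 != max(pob) % 2:
--         return any(moves)
--     else:
--         return all(moves)
-- ===== SOURCE B (Python) =====
-- def f(x1, x2, c, pob):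
--     if x1 + x2 >= 77:
--         return c in pob
--     m = max(pob)
--     if c >= m:
--         return 0
--     mx = m % 2
--
--     def solve(k, d, states):
--         # layered DP: returns {state: game value at depth d} for every state in `states`,
--         # where k = m - d levels remain before the c >= max(pob) cut-off
--         if k == 0:
--             return {(a, b): ((d in pob) if a + b >= 77 else False) for (a, b) in states}
--         nxt = set()
--         for a, b in states:
--             if a + b < 77:
--                 nxt.update(((a + 1, b), (a, b + 1), (a * 2, b), (a, b * 2)))
--         val = solve(k - 1, d + 1, nxt)
--         out = {}
--         for a, b in states:
--             if a + b >= 77: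
--                 out[(a, b)] = d in pob
--             else:
--                 moves = [val[(a + 1, b)], val[(a, b + 1)], val[(a * 2, b)], val[(a, b * 2)]]
--                 out[(a, b)] = any(moves) if d % 2 != mx else all(moves)
--         return out
--
--     return solve(m - c, c, {(x1, x2)})[(x1, x2)]
-- ===== Notes on version B (the rewrite author's own statement) =====
-- stated objective: alternative
-- what changed: Replaces the naive per-state 4-way game-tree recursion with a layered DP: a forward pass builds the set of reachable (pile1,pile2) states per depth, then a backward pass computes each layer's values as a dict from the next layer's dict, so each distinct state per depth is evaluated once instead of once per tree path.
-- outside the precondition, e.g. on f(1, 1, 1, [0]): A returns 0, B returns 0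
import Mathlib
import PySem

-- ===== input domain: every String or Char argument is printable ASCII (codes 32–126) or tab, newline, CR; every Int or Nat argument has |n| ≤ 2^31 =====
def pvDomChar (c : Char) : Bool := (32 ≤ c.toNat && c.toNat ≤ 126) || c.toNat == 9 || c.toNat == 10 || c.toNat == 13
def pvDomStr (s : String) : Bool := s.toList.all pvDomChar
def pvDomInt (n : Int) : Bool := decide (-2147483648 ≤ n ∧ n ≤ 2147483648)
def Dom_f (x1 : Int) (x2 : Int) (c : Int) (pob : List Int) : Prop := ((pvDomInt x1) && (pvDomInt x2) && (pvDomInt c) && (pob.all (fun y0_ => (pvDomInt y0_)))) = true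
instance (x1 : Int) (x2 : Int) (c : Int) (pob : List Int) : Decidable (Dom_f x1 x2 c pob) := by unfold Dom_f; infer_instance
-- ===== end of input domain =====

-- B replaces A's per-state 4-way game-tree recursion by a layered DP (forward reachable-state
-- sets per depth, backward per-layer value dicts); return-value equivalence proved on Pre_f.

-- ===== PORT A =====
-- A's recursion, with fuel = (max(pob) - c).toNat: c strictly increases towards max(pob)
def fRec (pob : List Int) (m : Int) (fuel : Nat) (x1 : Int) (x2 : Int) (c : Int) : Bool :=
  if 77 ≤ x1 + x2 then pob.contains c
  else if m ≤ c then false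
  else
    match fuel with
    | 0 => false
    | f' + 1 =>
      let moves := [fRec pob m f' (x1 + 1) x2 (c + 1), fRec pob m f' x1 (x2 + 1) (c + 1),
                    fRec pob m f' (x1 * 2) x2 (c + 1), fRec pob m f' x1 (x2 * 2) (c + 1)]
      if PySem.Int.mod c 2 ≠ PySem.Int.mod m 2 then moves.any id else moves.all id

def f (x1 : Int) (x2 : Int) (c : Int) (pob : List Int) : Bool :=
  if 77 ≤ x1 + x2 then pob.contains c
  else
    match PySem.List.max? pob (fun y => y) with
    | none => false   -- max([]) raises ValueError: excluded by Pre_f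
    | some m => fRec pob m ((m - c).toNat) x1 x2 c

-- ===== PORT B =====
-- the four successor states of one state
def succsB (a b : Int) : List (Int × Int) :=
  [(a + 1, b), (a, b + 1), (a * 2, b), (a, b * 2)]

-- forward step: the set of states reachable at the next depth
def nextStatesB (L : List (Int × Int)) : List (Int × Int) :=
  PySem.Set.ofList ((L.filter (fun s => s.1 + s.2 < 77)).flatMap (fun s => succsB s.1 s.2))

-- Source B's solve(k, d, states): the per-layer value dict (as an association list),
-- each layer's dict computed by a map over its states from the next layer's dict
def solveB (pob : List Int) (mx : Int) : Nat → Int → List (Int × Int) → List ((Int × Int) × Bool)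
  | 0, d, L => L.map (fun s => (s, if 77 ≤ s.1 + s.2 then pob.contains d else false))
  | k + 1, d, L =>
      let val := solveB pob mx k (d + 1) (nextStatesB L)
      L.map (fun s => (s,
        if 77 ≤ s.1 + s.2 then pob.contains d
        else
          let moves := (succsB s.1 s.2).map (fun t => (val.lookup t).getD false)
          if PySem.Int.mod d 2 ≠ mx then moves.any id else moves.all id))

def f_alt (x1 : Int) (x2 : Int) (c : Int) (pob : List Int) : Bool :=
  if 77 ≤ x1 + x2 then pob.contains c
  else
    match PySem.List.max? pob (fun y => y) with
    | none => false   -- max([]) raises ValueError: excluded by Pre_f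
    | some m =>
      if m ≤ c then false
      else ((solveB pob (PySem.Int.mod m 2) ((m - c).toNat) c [(x1, x2)]).lookup (x1, x2)).getD false

-- ===== PRECONDITION & SPEC =====
-- Pre_f excludes the inputs on which A raises: empty pob with x1 + x2 < 77 (max([]) is a ValueError)
-- and recursion deeper than CPython's stack limit, i.e. max(pob) - c beyond ~1000 (RecursionError;
-- we cut at 800); it also excludes the inputs where A returns the bare int 0 instead of a bool
-- (x1 + x2 < 77 and c ≥ max(pob)), a value outside the declared return type; B returns the same 0 there.
def Pre_f (x1 : Int) (x2 : Int) (c : Int) (pob : List Int) : Prop :=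
  77 ≤ x1 + x2 ∨ ((∃ y ∈ pob, c < y) ∧ ∀ y ∈ pob, y ≤ c + 800)
instance (x1 : Int) (x2 : Int) (c : Int) (pob : List Int) : Decidable (Pre_f x1 x2 c pob) := by unfold Pre_f; infer_instance
def pvWitness_f : Int × Int × Int × List Int := (0, 0, 0, [5])
def Spec_f (x1 : Int) (x2 : Int) (c : Int) (pob : List Int) (out : Bool) : Prop := out = f_alt x1 x2 c pob
instance (x1 : Int) (x2 : Int) (c : Int) (pob : List Int) (out : Bool) : Decidable (Spec_f x1 x2 c pob out) := by unfold Spec_f; infer_instance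

-- ===== CLAIM (what is proved, stated in full; the proofs are below) =====
def Claim_equal_f : Prop := ∀ (x1 : Int) (x2 : Int) (c : Int) (pob : List Int), Dom_f x1 x2 c pob → Pre_f x1 x2 c pob → Spec_f x1 x2 c pob (f x1 x2 c pob)

-- ===== LEMMAS AND PROOFS =====

-- looking up a key of L in the dict built by mapping g over L yields g of the key
lemma lookup_map_pair {α β : Type} [BEq α] [LawfulBEq α] (g : α → β) (L : List α) (s : α)
    (hs : s ∈ L) : (L.map (fun t => (t, g t))).lookup s = some (g s) := by
  induction L with
  | nil => simp at hs
  | cons t L ih =>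
    by_cases h : s = t
    · subst h; simp
    · have hne : (s == t) = false := by simp [h]
      have hs' : s ∈ L := by
        rcases List.mem_cons.mp hs with h' | h'
        · exact absurd h' h
        · exact h'
      simp [List.lookup, hne, ih hs']

-- each layer's dict stores exactly the naive-recursion value of its states
lemma solveB_lookup (pob : List Int) (m : Int) :
    ∀ (k : Nat) (d : Int) (L : List (Int × Int)), k = (m - d).toNat →
      ∀ s ∈ L, (solveB pob (PySem.Int.mod m 2) k d L).lookup s
        = some (fRec pob m k s.1 s.2 d) := by
  intro k
  induction k with
  | zero =>
    intro d L hk s hs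
    have hmd : m ≤ d := by omega
    rw [solveB, lookup_map_pair _ L s hs]
    by_cases h77 : 77 ≤ s.1 + s.2
    · simp [fRec, h77]
    · simp [fRec, h77, hmd]
  | succ n ih =>
    intro d L hk s hs
    have hdm : d < m := by omega
    have hn : n = (m - (d + 1)).toNat := by omega
    rw [solveB, lookup_map_pair _ L s hs]
    by_cases h77 : 77 ≤ s.1 + s.2
    · simp [fRec, h77]
    · have hmem : ∀ t ∈ succsB s.1 s.2, t ∈ nextStatesB L := by
        intro t ht
        unfold nextStatesB
        rw [PySem.Set.mem_ofList]
        exact List.mem_flatMap.mpr ⟨s, List.mem_filter.mpr ⟨hs, by simpa using h77⟩, ht⟩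
      have hval : ∀ t ∈ succsB s.1 s.2,
          (((solveB pob (PySem.Int.mod m 2) n (d + 1) (nextStatesB L)).lookup t).getD false)
            = fRec pob m n t.1 t.2 (d + 1) := by
        intro t ht
        rw [ih (d + 1) (nextStatesB L) hn t (hmem t ht)]
        rfl
      have h1 := hval (s.1 + 1, s.2) (by simp [succsB])
      have h2 := hval (s.1, s.2 + 1) (by simp [succsB])
      have h3 := hval (s.1 * 2, s.2) (by simp [succsB])
      have h4 := hval (s.1, s.2 * 2) (by simp [succsB])
      simp only [succsB, List.map_cons, List.map_nil] at *
      rw [h1, h2, h3, h4]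
      have hnm : ¬ m ≤ d := by omega
      simp [fRec, h77, hnm]

-- ===== VERDICT (by name: the statement is the Claim_ definition above) =====
theorem f_spec : Claim_equal_f := by
  intro x1 x2 c pob _hdom _hpre
  unfold Spec_f f f_alt
  by_cases h77 : 77 ≤ x1 + x2
  · simp [h77]
  · cases hmax : PySem.List.max? pob (fun y => y) with
    | none => simp [h77]
    | some m =>
      simp only [if_neg h77]
      by_cases hmc : m ≤ c
      · have h0 : (m - c).toNat = 0 := by omega
        simp [hmc, h0, fRec, h77]
      · have hk : (m - c).toNat = (m - c).toNat := rfl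
        rw [if_neg hmc,
          solveB_lookup pob m ((m - c).toNat) c [(x1, x2)] rfl (x1, x2) (by simp)]
        rfl
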